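-- pv_equiv track=rewrite | github.com/marcinpanfil/advent-of-code-python | 2020/day10.py | find_jolts
-- ===== SOURCE A (Python) =====
-- def find_jolts(values):
--     cur_step = 0
--     one_jolts_count = 0
--     three_jolts_count = 0
--
--     while True:
--         if cur_step + 1 in values:
--             cur_step += 1
--             one_jolts_count += 1
--         elif cur_step + 2 in values:
--             cur_step += 2
--         elif cur_step + 3 in values:
--             cur_step += 3
--             three_jolts_count += 1
--         else:
--             return one_jolts_count * (three_jolts_count + 1)
-- ===== SOURCE B (Python) =====
-- def find_jolts(values):
--     one = 0
--     three = 0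
--     prev = 0
--     for v in sorted(set(x for x in values if x > 0)):
--         diff = v - prev
--         if diff > 3:
--             break
--         if diff == 1:
--             one += 1
--         elif diff == 3:
--             three += 1
--         prev = v
--     return one * (three + 1)
-- ===== Notes on version B (the rewrite author's own statement) =====
-- stated objective: alternative
-- what changed: Replaced A's greedy while-loop that repeatedly tests cur+1/cur+2/cur+3 membership in the raw list by one sort of the distinct positive values followed by a single pass over consecutive differences, breaking at the first gap > 3.
import Mathlib
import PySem

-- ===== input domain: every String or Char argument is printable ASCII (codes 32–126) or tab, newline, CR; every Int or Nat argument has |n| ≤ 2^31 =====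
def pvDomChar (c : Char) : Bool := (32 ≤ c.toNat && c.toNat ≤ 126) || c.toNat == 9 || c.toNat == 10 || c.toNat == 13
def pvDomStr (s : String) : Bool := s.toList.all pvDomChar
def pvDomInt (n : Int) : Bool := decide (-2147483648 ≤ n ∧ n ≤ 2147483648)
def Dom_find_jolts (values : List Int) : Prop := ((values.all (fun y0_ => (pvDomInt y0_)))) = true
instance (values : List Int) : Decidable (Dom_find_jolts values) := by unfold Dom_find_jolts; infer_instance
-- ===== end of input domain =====

-- B replaces A's repeated linear membership walk by one sort of the distinct positive
-- values followed by a single pass over consecutive differences (alternative algorithm).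


-- ===== PORT A =====
-- termination helper for A's while-loop: each step raises cur to a member of values,
-- so the number of values above cur strictly decreases
theorem fj_measure_lt (values : List Int) (cur k : Int) (hk : 0 < k)
    (hm : (cur + k) ∈ values) :
    (values.filter (fun v => decide (cur + k < v))).length <
      (values.filter (fun v => decide (cur < v))).length := by
  have hsub : (values.filter (fun v => decide (cur + k < v))).Sublist
      (values.filter (fun v => decide (cur < v))) := by
    apply List.monotone_filter_right
    intro a ha
    simp only [decide_eq_true_eq] at *
    omega
  rcases Nat.lt_or_ge (values.filter (fun v => decide (cur + k < v))).length
      (values.filter (fun v => decide (cur < v))).length with h | h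
  · exact h
  · exfalso
    have hlen := hsub.length_le
    have heq := hsub.eq_of_length (Nat.le_antisymm hlen h)
    have h1 : (cur + k) ∈ values.filter (fun v => decide (cur < v)) := by
      simp only [List.mem_filter, decide_eq_true_eq]
      exact ⟨hm, by omega⟩
    rw [← heq] at h1
    simp only [List.mem_filter, decide_eq_true_eq] at h1
    omega

def fjLoop (values : List Int) (cur_step one_jolts_count three_jolts_count : Int) : Int :=
  if h1 : (cur_step + 1) ∈ values then
    fjLoop values (cur_step + 1) (one_jolts_count + 1) three_jolts_count
  else if h2 : (cur_step + 2) ∈ values then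
    fjLoop values (cur_step + 2) one_jolts_count three_jolts_count
  else if h3 : (cur_step + 3) ∈ values then
    fjLoop values (cur_step + 3) one_jolts_count (three_jolts_count + 1)
  else
    one_jolts_count * (three_jolts_count + 1)
termination_by (values.filter (fun v => decide (cur_step < v))).length
decreasing_by
  · exact fj_measure_lt values cur_step 1 (by omega) h1
  · exact fj_measure_lt values cur_step 2 (by omega) h2
  · exact fj_measure_lt values cur_step 3 (by omega) h3

def find_jolts (values : List Int) : Int :=
  fjLoop values 0 0 0

-- ===== PORT B =====
def fjAltLoop (prev one three : Int) : List Int → Int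
  | [] => one * (three + 1)
  | v :: rest =>
    let diff := v - prev
    if diff > 3 then one * (three + 1)
    else if diff = 1 then fjAltLoop v (one + 1) three rest
    else if diff = 3 then fjAltLoop v one (three + 1) rest
    else fjAltLoop v one three rest

def find_jolts_alt (values : List Int) : Int :=
  fjAltLoop 0 0 0
    (PySem.List.sorted (PySem.Set.ofList (values.filter (fun x => decide (0 < x))))
      (fun x => x) false)

-- ===== PRECONDITION & SPEC =====
def Spec_find_jolts (values : List Int) (out : Int) : Prop := out = find_jolts_alt values
instance (values : List Int) (out : Int) : Decidable (Spec_find_jolts values out) := by unfold Spec_find_jolts; infer_instance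

-- ===== CLAIM (what is proved, stated in full; the proofs are below) =====
def Claim_equal_find_jolts : Prop := ∀ (values : List Int), Dom_find_jolts values → Spec_find_jolts values (find_jolts values)

-- ===== LEMMAS AND PROOFS =====

-- Core invariant: if s is the strictly increasing list of exactly the values above cur,
-- A's membership walk and B's difference scan compute the same result.
theorem loop_eq (values : List Int) :
    ∀ (s : List Int) (cur one three : Int),
      s.Pairwise (· < ·) →
      (∀ x, x ∈ s ↔ x ∈ values ∧ cur < x) →
      fjLoop values cur one three = fjAltLoop cur one three s := by
  intro s
  induction s with
  | nil =>
    intro cur one three _ hmem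
    have h1 : (cur + 1) ∉ values := fun h => by have := (hmem (cur + 1)).2 ⟨h, by omega⟩; simp at this
    have h2 : (cur + 2) ∉ values := fun h => by have := (hmem (cur + 2)).2 ⟨h, by omega⟩; simp at this
    have h3 : (cur + 3) ∉ values := fun h => by have := (hmem (cur + 3)).2 ⟨h, by omega⟩; simp at this
    rw [fjLoop]
    simp [h1, h2, h3, fjAltLoop]
  | cons v rest ih =>
    intro cur one three hpair hmem
    have hpr := (List.pairwise_cons.mp hpair)
    have hv : v ∈ values ∧ cur < v := (hmem v).1 (by simp)
    have hmin : ∀ x, x ∈ values → cur < x → v ≤ x := by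
      intro x hx hcx
      rcases ((hmem x).2 ⟨hx, hcx⟩) with h | h
      · simp_all
      · rcases List.mem_cons.mp ((hmem x).2 ⟨hx, hcx⟩) with h' | h'
        · omega
        · exact le_of_lt (hpr.1 x h')
    have hrest : ∀ x, x ∈ rest ↔ x ∈ values ∧ v < x := by
      intro x
      constructor
      · intro hx
        have hxs : x ∈ v :: rest := List.mem_cons_of_mem _ hx
        exact ⟨((hmem x).1 hxs).1, hpr.1 x hx⟩
      · rintro ⟨hx, hvx⟩
        have := (hmem x).2 ⟨hx, by omega⟩
        rcases List.mem_cons.mp this with h' | h'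
        · omega
        · exact h'
    -- four cases on the gap v - cur
    rcases (by omega : v = cur + 1 ∨ v = cur + 2 ∨ v = cur + 3 ∨ cur + 3 < v) with hc | hc | hc | hc
    · have h1 : (cur + 1) ∈ values := hc ▸ hv.1
      rw [fjLoop]
      simp only [h1, dif_pos]
      rw [ih (cur + 1) (one + 1) three hpr.2 (by intro x; rw [hrest x, hc]), fjAltLoop]
      simp only [show v - cur = 1 by omega]
      norm_num
      rw [hc]
    · have h1 : (cur + 1) ∉ values := fun h => by have := hmin _ h (by omega); omega
      have h2 : (cur + 2) ∈ values := hc ▸ hv.1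
      rw [fjLoop]
      simp only [h1, h2, dif_neg, not_false_iff, dif_pos]
      rw [ih (cur + 2) one three hpr.2 (by intro x; rw [hrest x, hc]), fjAltLoop]
      simp only [show v - cur = 2 by omega]
      norm_num
      rw [hc]
    · have h1 : (cur + 1) ∉ values := fun h => by have := hmin _ h (by omega); omega
      have h2 : (cur + 2) ∉ values := fun h => by have := hmin _ h (by omega); omega
      have h3 : (cur + 3) ∈ values := hc ▸ hv.1
      rw [fjLoop]
      simp only [h1, h2, h3, dif_neg, not_false_iff, dif_pos]
      rw [ih (cur + 3) one (three + 1) hpr.2 (by intro x; rw [hrest x, hc]), fjAltLoop]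
      simp only [show v - cur = 3 by omega]
      norm_num
      rw [hc]
    · have h1 : (cur + 1) ∉ values := fun h => by have := hmin _ h (by omega); omega
      have h2 : (cur + 2) ∉ values := fun h => by have := hmin _ h (by omega); omega
      have h3 : (cur + 3) ∉ values := fun h => by have := hmin _ h (by omega); omega
      rw [fjLoop]
      simp only [h1, h2, h3, dif_neg, not_false_iff]
      rw [fjAltLoop]
      simp only [show v - cur > 3 by omega, if_pos]

-- ===== VERDICT (by name: the statement is the Claim_ definition above) =====
theorem find_jolts_spec : Claim_equal_find_jolts := by
  intro values _
  unfold Spec_find_jolts find_jolts find_jolts_alt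
  apply loop_eq
  · exact PySem.List.sorted_ofList_pairwise_lt _
  · intro x
    rw [PySem.List.mem_sorted, PySem.Set.mem_ofList, List.mem_filter]
    simp
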